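-- pv_equiv track=rewrite | github.com/belovmd/it-academy-spring-2021 | src/homework2/codewars_task/scramblines_5kuy.py | scramble2
-- ===== SOURCE A (Python) =====
-- def scramble2(s1, s2):   # STDERR Execution Timed Out (12000 ms) =(
--     for char in s2:
--         if not(char in s2):
--             return False
--         count_s1 = s1.count(char)
--         count_s2 = s2.count(char)
--         if count_s1 < count_s2:
--             return False
--     return True
-- ===== SOURCE B (Python) =====
-- def scramble2(s1, s2):
--     avail = {}
--     for c in s1:
--         avail[c] = avail.get(c, 0) + 1
--     for c in s2:
--         n = avail.get(c, 0)
--         if n == 0: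
--             return False
--         avail[c] = n - 1
--     return True
-- ===== Notes on version B (the rewrite author's own statement) =====
-- stated objective: faster
-- what changed: Replaces A's per-character rescans of both strings (count in s1 and s2 for every character of s2) with a single pass that builds a character-count dict of s1 once and then consumes one count per character of s2.
import Mathlib
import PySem

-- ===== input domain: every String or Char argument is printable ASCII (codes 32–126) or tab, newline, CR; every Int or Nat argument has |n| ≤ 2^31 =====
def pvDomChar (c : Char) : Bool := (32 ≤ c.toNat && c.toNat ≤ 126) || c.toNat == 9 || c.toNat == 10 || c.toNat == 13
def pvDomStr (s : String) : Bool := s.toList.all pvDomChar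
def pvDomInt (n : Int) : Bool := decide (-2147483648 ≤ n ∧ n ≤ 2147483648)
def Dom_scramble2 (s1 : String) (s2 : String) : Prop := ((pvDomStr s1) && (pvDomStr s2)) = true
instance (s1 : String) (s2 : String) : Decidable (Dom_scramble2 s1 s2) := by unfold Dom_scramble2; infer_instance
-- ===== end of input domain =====

-- B builds a character-count dict of s1 once and consumes it over s2 (one pass),
-- instead of A's per-character count() rescans of both strings; objective: faster.


-- ===== PORT A =====
-- loop 'for char in s2' over the characters of s2; 'char in s2' is membership of the one
-- character in s2, and 'sX.count(char)' is the character count (exact for a 1-char needle)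
def scramble2Loop (l1 l2 : List Char) : List Char → Bool
  | [] => true
  | c :: rest =>
    if ¬ (l2.contains c) then false
    else
      let count_s1 := l1.count c
      let count_s2 := l2.count c
      if count_s1 < count_s2 then false
      else scramble2Loop l1 l2 rest

def scramble2 (s1 : String) (s2 : String) : Bool :=
  scramble2Loop s1.toList s2.toList s2.toList

-- ===== PORT B =====
-- second loop of Source B: consume one available count per character of s2 (Source B's 'n' inlined)
def scramble2AltLoop (d : PySem.Dict Char Int) : List Char → Bool
  | [] => true
  | c :: rest =>
    if d.getD c 0 = 0 then false
    else scramble2AltLoop (d.insert c (d.getD c 0 - 1)) rest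

def scramble2_alt (s1 : String) (s2 : String) : Bool :=
  let avail := s1.toList.foldl (fun d c => d.insert c (d.getD c 0 + 1)) PySem.Dict.empty
  scramble2AltLoop avail s2.toList

-- ===== PRECONDITION & SPEC =====
def Spec_scramble2 (s1 : String) (s2 : String) (out : Bool) : Prop := out = scramble2_alt s1 s2
instance (s1 : String) (s2 : String) (out : Bool) : Decidable (Spec_scramble2 s1 s2 out) := by unfold Spec_scramble2; infer_instance

-- ===== CLAIM (what is proved, stated in full; the proofs are below) =====
def Claim_equal_scramble2 : Prop := ∀ (s1 : String) (s2 : String), Dom_scramble2 s1 s2 → Spec_scramble2 s1 s2 (scramble2 s1 s2)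

-- ===== LEMMAS AND PROOFS =====

-- A's loop, on a suffix whose elements all occur in l2, decides the pointwise count condition
theorem scramble2Loop_eq (l1 l2 : List Char) (rem : List Char)
    (hsub : ∀ c ∈ rem, c ∈ l2) :
    scramble2Loop l1 l2 rem = decide (∀ c ∈ rem, l2.count c ≤ l1.count c) := by
  induction rem with
  | nil => simp [scramble2Loop]
  | cons c rest ih =>
    have hc : l2.contains c := by simpa using hsub c (by simp)
    rw [scramble2Loop]
    simp only [hc, not_true_eq_false, if_false]
    by_cases h : l1.count c < l2.count c
    · simp only [h, if_true]
      have hne : ¬ (∀ x ∈ c :: rest, l2.count x ≤ l1.count x) := by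
        intro hall
        exact absurd (hall c (by simp)) (by omega)
      exact (decide_eq_false hne).symm
    · simp only [h, if_false]
      rw [ih (fun x hx => hsub x (List.mem_cons_of_mem _ hx))]
      have hce : l2.count c ≤ l1.count c := by omega
      rw [decide_eq_decide]
      simp [hce]

-- B's loop succeeds iff every character's multiplicity in the remaining list fits its dict entry
theorem scramble2AltLoop_iff (rem : List Char) :
    ∀ (d : PySem.Dict Char Int), (∀ c, 0 ≤ d.getD c 0) →
      (scramble2AltLoop d rem = true ↔ ∀ c ∈ rem, (rem.count c : Int) ≤ d.getD c 0) := by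
  induction rem with
  | nil => intro d _; simp [scramble2AltLoop]
  | cons a rest ih =>
    intro d hpos
    rw [scramble2AltLoop]
    by_cases hz : d.getD a 0 = 0
    · rw [if_pos hz]
      simp only [Bool.false_eq_true, false_iff]
      intro hall
      have h1 := hall a (by simp)
      rw [List.count_cons_self] at h1
      omega
    · rw [if_neg hz]
      have hget : ∀ c', (d.insert a (d.getD a 0 - 1)).getD c' 0
          = if c' = a then d.getD a 0 - 1 else d.getD c' 0 := by
        intro c'; rw [PySem.Dict.getD_insert]
      have hpos' : ∀ c', 0 ≤ (d.insert a (d.getD a 0 - 1)).getD c' 0 := by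
        intro c'; rw [hget]
        split_ifs with h
        · have := hpos a; omega
        · exact hpos c'
      rw [ih _ hpos']
      constructor
      · intro hall x hx
        by_cases hxa : x = a
        · subst hxa
          rw [List.count_cons_self]
          by_cases hmem : x ∈ rest
          · have h2 := hall x hmem
            rw [hget, if_pos rfl] at h2
            omega
          · have h0 : rest.count x = 0 := List.count_eq_zero.mpr hmem
            have := hpos x
            omega
        · have hxr : x ∈ rest := (List.mem_cons.mp hx).resolve_left hxa
          have h2 := hall x hxr
          rw [hget, if_neg hxa] at h2
          simpa [List.count_cons, (show ¬a = x from fun h => hxa h.symm)] using h2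
      · intro hall x hx
        rw [hget]
        by_cases hxa : x = a
        · subst hxa
          rw [if_pos rfl]
          have h2 := hall x (by simp)
          rw [List.count_cons_self] at h2
          omega
        · rw [if_neg hxa]
          have h2 := hall x (List.mem_cons_of_mem _ hx)
          simpa [List.count_cons, (show ¬a = x from fun h => hxa h.symm)] using h2

-- ===== VERDICT (by name: the statement is the Claim_ definition above) =====
theorem scramble2_spec : Claim_equal_scramble2 := by
  intro s1 s2 _
  unfold Spec_scramble2
  have havail : ∀ c : Char,
      (s1.toList.foldl (fun d c => d.insert c (d.getD c 0 + 1)) PySem.Dict.empty).getD c 0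
        = (s1.toList.count c : Int) := by
    intro c
    rw [PySem.Dict.getD_foldl_insert_add_one]
    simp
  have hpos : ∀ c : Char,
      (0 : Int) ≤ (s1.toList.foldl (fun d c => d.insert c (d.getD c 0 + 1)) PySem.Dict.empty).getD c 0 := by
    intro c; rw [havail c]; exact Int.natCast_nonneg _
  rw [Bool.eq_iff_iff, scramble2, scramble2Loop_eq _ _ _ (fun _ h => h)]
  show _ ↔ scramble2AltLoop (s1.toList.foldl (fun d c => d.insert c (d.getD c 0 + 1)) PySem.Dict.empty) s2.toList = true
  rw [scramble2AltLoop_iff _ _ hpos]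
  simp only [decide_eq_true_eq]
  constructor
  · intro h c hc
    rw [havail]
    exact_mod_cast h c hc
  · intro h c hc
    have h2 := h c hc
    rw [havail] at h2
    exact_mod_cast h2
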